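-- pv_equiv track=rewrite | github.com/Yugal88943/Crptography-Lab | Lab_5/Columnar_Transposition_Cipher.py | get_key_order
-- ===== SOURCE A (Python) =====
-- def get_key_order(key):
--     key_list = list(key)
--     sorted_key = sorted(key_list)
--     order = []
--
--     for ch in sorted_key:
--         index = key_list.index(ch)
--         order.append(index)
--         key_list[index] = None # Avoid duplicate issues
--     return order
-- ===== SOURCE B (Python) =====
-- def get_key_order(key):
--     positions = {}
--     for i, ch in enumerate(key):
--         positions.setdefault(ch, []).append(i)
--     order = []
--     for ch in sorted(positions):
--         order.extend(positions[ch])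
--     return order
-- ===== Notes on version B (the rewrite author's own statement) =====
-- stated objective: faster
-- what changed: Replaces the sort-of-all-characters plus repeated list.index scans with mutation by one grouping pass that records each character's index list in a dict, then flattens the groups over the sorted distinct characters.
import Mathlib
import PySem

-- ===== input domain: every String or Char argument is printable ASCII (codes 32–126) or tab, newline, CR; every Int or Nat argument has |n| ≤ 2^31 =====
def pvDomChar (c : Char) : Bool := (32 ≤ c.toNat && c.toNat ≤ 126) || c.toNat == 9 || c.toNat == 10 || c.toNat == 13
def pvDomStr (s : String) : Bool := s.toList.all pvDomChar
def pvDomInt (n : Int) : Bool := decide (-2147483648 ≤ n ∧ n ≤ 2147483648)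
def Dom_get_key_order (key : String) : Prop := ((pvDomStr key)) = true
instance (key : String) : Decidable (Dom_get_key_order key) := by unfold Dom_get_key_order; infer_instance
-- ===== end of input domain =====

-- B replaces A's sort-of-all-characters plus repeated list.index scans (with None-marking)
-- by one grouping pass into a char→indices dict, flattened over the sorted distinct characters (faster).

-- ===== PORT A =====
-- loop body of A: index = key_list.index(ch); order.append(index); key_list[index] = None
-- (the 'none' branch of the match is Python's unreachable ValueError: every ch of sorted_key is still present)
def pvStepA (st : List (Option Char) × List Int) (ch : Char) : List (Option Char) × List Int :=
  match PySem.List.index? st.1 (some ch) with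
  | some i => (st.1.set i none, st.2 ++ [(i : Int)])
  | none => st

def get_key_order (key : String) : List Int :=
  let key_list : List (Option Char) := key.toList.map some
  let sorted_key := PySem.List.sorted key.toList (fun c => c) false
  (sorted_key.foldl pvStepA (key_list, [])).2

-- ===== PORT B =====
def get_key_order_alt (key : String) : List Int :=
  let positions : PySem.Dict Char (List Int) :=
    (PySem.List.enumerate key.toList).foldl
      (fun d p => d.modify p.2 [] (fun v => v ++ [p.1])) PySem.Dict.empty
  (PySem.List.sorted positions.keys (fun c => c) false).foldl
    (fun order ch => order ++ positions.getD ch []) []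

-- ===== PRECONDITION & SPEC =====
def Spec_get_key_order (key : String) (out : List Int) : Prop := out = get_key_order_alt key
instance (key : String) (out : List Int) : Decidable (Spec_get_key_order key out) := by unfold Spec_get_key_order; infer_instance

-- ===== CLAIM (what is proved, stated in full; the proofs are below) =====
def Claim_equal_get_key_order : Prop := ∀ (key : String), Dom_get_key_order key → Spec_get_key_order key (get_key_order key)

-- ===== LEMMAS AND PROOFS =====

-- positions (from start s) of the still-unmarked occurrences of c in a marked list
def pvOcc : List (Option Char) → Char → Nat → List Nat
  | [], _, _ => []
  | o :: t, c, s => if o = some c then s :: pvOcc t c (s+1) else pvOcc t c (s+1)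

-- mark every occurrence of c as consumed
def pvMask (m : List (Option Char)) (c : Char) : List (Option Char) :=
  m.map (fun o => if o = some c then none else o)

theorem pvMask_cons (o : Option Char) (t : List (Option Char)) (c : Char) :
    pvMask (o :: t) c = (if o = some c then none else o) :: pvMask t c := rfl

theorem pvOcc_length (l : List Char) (c : Char) (s : Nat) :
    (pvOcc (l.map some) c s).length = l.count c := by
  induction l generalizing s with
  | nil => simp [pvOcc]
  | cons x t ih =>
    by_cases h : x = c <;>
      simp [pvOcc, h, ih]

theorem pvMask_of_occ_nil (m : List (Option Char)) (c : Char) (s : Nat)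
    (h : pvOcc m c s = []) : pvMask m c = m := by
  induction m generalizing s with
  | nil => simp [pvMask]
  | cons o t ih =>
    by_cases ho : o = some c
    · simp [pvOcc, ho] at h
    · simp only [pvOcc, ho, if_false] at h
      simpa [pvMask, ho] using ih (s + 1) h

theorem pvOcc_index? (m : List (Option Char)) (c : Char) (i : Nat) (s : Nat)
    (h : PySem.List.index? m (some c) = some i) :
    pvOcc m c s = (s + i) :: pvOcc (m.set i none) c s ∧
      pvMask (m.set i none) c = pvMask m c := by
  induction m generalizing s i with
  | nil => simp [PySem.List.index?_eq_idxOf?] at h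
  | cons o t ih =>
    by_cases ho : o = some c
    · subst ho
      rw [PySem.List.index?_cons_self] at h
      injection h with h
      subst h
      simp [pvOcc, pvMask]
    · rw [PySem.List.index?_cons_of_ne t ho] at h
      rcases Option.map_eq_some_iff.mp h with ⟨j, hj, rfl⟩
      obtain ⟨h1, h2⟩ := ih j (s + 1) hj
      constructor
      · simp only [pvOcc, ho, if_false, List.set_cons_succ]
        rw [h1]; ring_nf
      · simp only [pvMask, List.set_cons_succ, List.map_cons] at h2 ⊢
        simpa [pvMask] using h2

theorem pvOcc_mask_ne (m : List (Option Char)) (c c' : Char) (s : Nat)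
    (h : c' ≠ c) : pvOcc (pvMask m c) c' s = pvOcc m c' s := by
  induction m generalizing s with
  | nil => rfl
  | cons o t ih =>
    by_cases ho : o = some c
    · have h1 : (none : Option Char) ≠ some c' := by simp
      have h2 : o ≠ some c' := by rw [ho]; simp [Ne.symm h]
      simp [pvMask_cons, ho, pvOcc, h1, ih, Ne.symm h]
    · simp [pvMask_cons, ho, pvOcc, ih]

theorem pvGroupFold (c : Char) :
    ∀ (n : Nat) (m : List (Option Char)) (acc : List Int),
    (pvOcc m c 0).length = n →
    (List.replicate n c).foldl pvStepA (m, acc) =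
      (pvMask m c, acc ++ (pvOcc m c 0).map (fun i => (i : Int))) := by
  intro n
  induction n with
  | zero =>
    intro m acc h
    rw [List.length_eq_zero_iff] at h
    simp [h, pvMask_of_occ_nil m c 0 h]
  | succ n ih =>
    intro m acc h
    have hmem : some c ∈ m := by
      by_contra hn
      have : pvOcc m c 0 = [] := by
        clear h; generalize 0 = s
        induction m generalizing s with
        | nil => rfl
        | cons o t iht =>
          simp only [List.mem_cons, not_or] at hn
          simp [pvOcc, Ne.symm hn.1, iht hn.2]
      simp [this] at h
    obtain ⟨i, hi⟩ := Option.isSome_iff_exists.mp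
      ((PySem.List.index?_isSome_iff m (some c)).mpr hmem)
    obtain ⟨h1, h2⟩ := pvOcc_index? m c i 0 hi
    have hstep : pvStepA (m, acc) c = (m.set i none, acc ++ [(i : Int)]) := by
      have hi' := hi
      rw [PySem.List.index?_eq_idxOf?] at hi'
      simp [pvStepA, hi']
    rw [List.replicate_succ, List.foldl_cons, hstep,
      ih (m.set i none) (acc ++ [(i : Int)]) (by simp [h1] at h; omega)]
    rw [h2, h1]
    simp

theorem pvMainFold :
    ∀ (ds : List Char) (m : List (Option Char)) (acc : List Int), ds.Nodup →
    ((ds.flatMap (fun c => List.replicate (pvOcc m c 0).length c)).foldl pvStepA (m, acc)).2 =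
      acc ++ ds.flatMap (fun c => (pvOcc m c 0).map (fun i => (i : Int))) := by
  intro ds
  induction ds with
  | nil => simp
  | cons c t ih =>
    intro m acc hnd
    rw [List.nodup_cons] at hnd
    rw [List.flatMap_cons, List.foldl_append,
      pvGroupFold c (pvOcc m c 0).length m acc rfl]
    have hcong : t.flatMap (fun c' => List.replicate (pvOcc m c' 0).length c') =
        t.flatMap (fun c' => List.replicate (pvOcc (pvMask m c) c' 0).length c') := by
      apply List.flatMap_congr
      intro c' hc'
      rw [pvOcc_mask_ne m c c' 0 (fun hh => hnd.1 (hh ▸ hc'))]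
    have hcong2 : t.flatMap (fun c' => (pvOcc m c' 0).map (fun i => (i : Int))) =
        t.flatMap (fun c' => (pvOcc (pvMask m c) c' 0).map (fun i => (i : Int))) := by
      apply List.flatMap_congr
      intro c' hc'
      rw [pvOcc_mask_ne m c c' 0 (fun hh => hnd.1 (hh ▸ hc'))]
    rw [hcong, ih (pvMask m c) _ hnd.2, List.flatMap_cons, hcong2]
    simp

-- the sorted distinct characters of l
def pvDs (l : List Char) : List Char :=
  PySem.List.sorted (PySem.Set.ofList l) (fun c => c) false

theorem pvDs_pairwise (l : List Char) : (pvDs l).Pairwise (· < ·) :=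
  PySem.List.sorted_ofList_pairwise_lt l

theorem pvDs_nodup (l : List Char) : (pvDs l).Nodup :=
  (pvDs_pairwise l).imp ne_of_lt

theorem pvDs_mem (l : List Char) (c : Char) : c ∈ pvDs l ↔ c ∈ l := by
  rw [pvDs, PySem.List.mem_sorted, PySem.Set.mem_ofList]

theorem pvCount_flatMap_replicate (ds : List Char) (f : Char → Nat) (a : Char)
    (hnd : ds.Nodup) :
    (ds.flatMap (fun c => List.replicate (f c) c)).count a =
      if a ∈ ds then f a else 0 := by
  induction ds with
  | nil => simp
  | cons c t ih =>
    rw [List.nodup_cons] at hnd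
    rw [List.flatMap_cons, List.count_append, List.count_replicate, ih hnd.2]
    by_cases hac : a = c
    · subst hac; simp [hnd.1]
    · simp [hac, Ne.symm hac]

theorem pvPairwise_flatMap_replicate (ds : List Char) (f : Char → Nat)
    (h : ds.Pairwise (· < ·)) :
    (ds.flatMap (fun c => List.replicate (f c) c)).Pairwise (· ≤ ·) := by
  induction ds with
  | nil => simp
  | cons c t ih =>
    rw [List.pairwise_cons] at h
    rw [List.flatMap_cons, List.pairwise_append]
    refine ⟨List.pairwise_replicate.mpr (Or.inr le_rfl), ih h.2, ?_⟩
    intro a ha b hb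
    rw [List.eq_of_mem_replicate ha]
    obtain ⟨c', hc', hbc'⟩ := List.mem_flatMap.mp hb
    rw [List.eq_of_mem_replicate hbc']
    exact le_of_lt (h.1 c' hc')

theorem pvSorted_groups (l : List Char) :
    PySem.List.sorted l (fun c => c) false =
      (pvDs l).flatMap (fun c => List.replicate (l.count c) c) := by
  apply PySem.List.sorted_id_eq_of_perm_of_pairwise
  · rw [List.perm_iff_count]
    intro a
    rw [pvCount_flatMap_replicate _ _ _ (pvDs_nodup l)]
    by_cases ha : a ∈ l
    · simp [(pvDs_mem l a).mpr ha]
    · rw [if_neg (fun h => ha ((pvDs_mem l a).mp h)), List.count_eq_zero_of_not_mem ha]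
  · exact pvPairwise_flatMap_replicate (pvDs l) _ (pvDs_pairwise l)

-- B-side: the dict's index list for c is exactly the occurrence positions of c
theorem pvDict_getD (l : List Char) (c : Char) :
    ((PySem.List.enumerate l).foldl
        (fun d p => d.modify p.2 [] (fun v => v ++ [p.1])) PySem.Dict.empty).getD c [] =
      ((PySem.List.enumerate l).filter (fun p => p.2 == c)).map (·.1) := by
  have hswap : (PySem.List.enumerate l).foldl
      (fun d p => d.modify p.2 [] (fun v => v ++ [p.1])) PySem.Dict.empty =
      ((PySem.List.enumerate l).map Prod.swap).foldl
      (fun d p => d.modify p.1 [] (fun v => v ++ [p.2])) PySem.Dict.empty := by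
    rw [List.foldl_map]
    rfl
  rw [hswap, PySem.Dict.getD_foldl_modify_append, List.filter_map, List.map_map]
  simp [Function.comp_def]

theorem pvDict_keys (key_l : List Char) :
    ((PySem.List.enumerate key_l).foldl
        (fun d p => d.modify p.2 [] (fun v => v ++ [p.1])) PySem.Dict.empty).keys =
      PySem.Set.ofList key_l := by
  have hk := PySem.Dict.keys_foldl_modify_key (κ := Char) (ν := List Int)
    (PySem.List.enumerate key_l) (fun p => p.2) [] (fun _ p v => v ++ [p.1]) PySem.Dict.empty
  simpa [PySem.List.map_snd_enumerate, PySem.Set.ofList, PySem.Set.update,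
    PySem.Dict.keys_empty] using hk

theorem pvEnum_filter_eq_occ (c : Char) :
    ∀ (l : List Char) (s : Nat),
    ((PySem.List.enumerate l (s : Int)).filter (fun p => p.2 == c)).map (·.1) =
      (pvOcc (l.map some) c s).map (fun i => (i : Int)) := by
  intro l
  induction l with
  | nil => intro s; rfl
  | cons x t ih =>
    intro s
    rw [PySem.List.enumerate_cons]
    by_cases hx : x = c
    · subst hx
      simp only [List.filter_cons]
      have := ih (s + 1)
      push_cast at this ⊢
      simp_all [pvOcc]
    · simp only [List.filter_cons]
      have := ih (s + 1)
      push_cast at this ⊢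
      simp_all [pvOcc]

-- ===== VERDICT (by name: the statement is the Claim_ definition above) =====
theorem get_key_order_spec : Claim_equal_get_key_order := by
  intro key _
  unfold Spec_get_key_order get_key_order get_key_order_alt
  set l := key.toList with hl
  simp only
  rw [pvDict_keys l, PySem.List.foldl_append_eq_flatMap]
  rw [pvSorted_groups l]
  have hcnt : (pvDs l).flatMap (fun c => List.replicate (l.count c) c) =
      (pvDs l).flatMap (fun c => List.replicate (pvOcc (l.map some) c 0).length c) := by
    apply List.flatMap_congr
    intro c _
    rw [pvOcc_length]
  rw [hcnt, pvMainFold (pvDs l) (l.map some) [] (pvDs_nodup l), List.nil_append]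
  show _ = [] ++ _
  rw [List.nil_append]
  apply List.flatMap_congr
  intro c _
  rw [pvDict_getD l c]
  have := (pvEnum_filter_eq_occ c l 0).symm
  simpa using this
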